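-- pv_equiv track=rewrite | github.com/seanBr97/Codility-Lessons | TapeEquilibrium.py | solution
-- ===== SOURCE A (Python) =====
-- def solution(A):
--     N = len(A)
--     smallest_difference = abs(A[0] - sum(A[1:N])) # the first possible answer
--     for split in range (1, N):
--         left_split = sum(A[0:split])
--         right_split = sum(A[split:N])
--         difference = abs(left_split - right_split)
--         if difference < smallest_difference:
--             smallest_difference = difference
--         # smallest_difference = min(smallest_difference, difference)
--     return smallest_difference
-- ===== SOURCE B (Python) =====
-- def solution(A):
--     total = sum(A)
--     left = A[0]
--     best = abs(2 * left - total)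
--     for x in A[1:-1]:
--         left += x
--         d = abs(2 * left - total)
--         if d < best:
--             best = d
--     return best
-- ===== Notes on version B (the rewrite author's own statement) =====
-- stated objective: faster
-- what changed: B precomputes the total sum once and maintains a running left sum in a single pass, replacing A's per-split recomputation of both slice sums (and A's redundant re-evaluation of split=1).
import Mathlib
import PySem

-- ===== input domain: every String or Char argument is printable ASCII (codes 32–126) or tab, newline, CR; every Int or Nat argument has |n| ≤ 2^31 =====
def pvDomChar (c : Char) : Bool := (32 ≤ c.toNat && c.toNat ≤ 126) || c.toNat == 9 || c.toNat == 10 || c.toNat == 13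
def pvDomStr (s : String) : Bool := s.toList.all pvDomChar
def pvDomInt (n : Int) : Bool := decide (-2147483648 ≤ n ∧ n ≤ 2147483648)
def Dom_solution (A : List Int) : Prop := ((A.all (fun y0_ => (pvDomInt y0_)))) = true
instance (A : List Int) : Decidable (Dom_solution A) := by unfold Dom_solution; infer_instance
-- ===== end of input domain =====

-- B precomputes the total sum once and keeps a running left sum in a single pass,
-- replacing A's per-split recomputation of both slice sums; objective: faster.

-- ===== PORT A =====
def solution (A : List Int) : Int :=
  let N : Int := A.length
  let smallest : Int := |PySem.List.pyGetD A 0 0 - (PySem.List.slice A (some 1) (some N)).sum|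
  (PySem.List.pyRange 1 N 1).foldl
    (fun best split =>
      let left := (PySem.List.slice A (some 0) (some split)).sum
      let right := (PySem.List.slice A (some split) (some N)).sum
      let d := |left - right|
      if d < best then d else best) smallest

-- ===== PORT B =====
def solution_alt (A : List Int) : Int :=
  let total := A.sum
  let left0 := PySem.List.pyGetD A 0 0
  let best0 : Int := |2 * left0 - total|
  ((PySem.List.slice A (some 1) (some (-1))).foldl
    (fun (p : Int × Int) x =>
      (if |2 * (p.2 + x) - total| < p.1 then |2 * (p.2 + x) - total| else p.1, p.2 + x))
    (best0, left0)).1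

-- ===== PRECONDITION & SPEC =====
-- Pre_ excludes only the empty list, where A raises IndexError on A[0] (B raises there too).
def Pre_solution (A : List Int) : Prop := A ≠ []
instance (A : List Int) : Decidable (Pre_solution A) := by unfold Pre_solution; infer_instance
def pvWitness_solution : List Int := [3, 1, 2, 4, 3]

def Spec_solution (A : List Int) (out : Int) : Prop := out = solution_alt A
instance (A : List Int) (out : Int) : Decidable (Spec_solution A out) := by unfold Spec_solution; infer_instance

-- ===== CLAIM (what is proved, stated in full; the proofs are below) =====
def Claim_equal_solution : Prop := ∀ (A : List Int), Dom_solution A → Pre_solution A → Spec_solution A (solution A)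

-- ===== LEMMAS AND PROOFS =====

-- A[1:-1] on a nonempty list is the tail without its last element
lemma slice_one_neg_one (a : Int) (rest : List Int) :
    PySem.List.slice (a :: rest) (some 1) (some (-1)) = rest.dropLast := by
  have h : ¬((rest.length : Int) < 0) := by omega
  simp [PySem.List.slice, PySem.List.clampIdx, List.dropLast_eq_take, h]

-- A's slice over a split point, as take/drop
lemma slice_split_left (A : List Int) (s : ℕ) :
    PySem.List.slice A (some 0) (some ((s : Int))) = A.take s := by
  simp [PySem.List.slice_zero_start, PySem.List.slice_to_natCast]

lemma slice_split_right (A : List Int) (s : ℕ) :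
    PySem.List.slice A (some (s : Int)) (some (A.length : Int)) = A.drop s := by
  rw [PySem.List.slice_natCast]
  simp

-- the two loops, generalized: B's running-sum fold over the remaining elements equals
-- A's slice-sum fold over the remaining split points
lemma loop_eq (A : List Int) : ∀ (xs : List Int) (z : Int) (s : ℕ) (b : Int),
    A.drop s = xs ++ [z] →
    (xs.foldl
      (fun (p : Int × Int) x =>
        (if |2 * (p.2 + x) - A.sum| < p.1 then |2 * (p.2 + x) - A.sum| else p.1, p.2 + x))
      (b, (A.take s).sum)).1
    = (PySem.List.pyRange ((s : Int) + 1) (A.length : Int) 1).foldl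
        (fun best split =>
          let left := (PySem.List.slice A (some 0) (some split)).sum
          let right := (PySem.List.slice A (some split) (some (A.length : Int))).sum
          let d := |left - right|
          if d < best then d else best) b := by
  intro xs
  induction xs with
  | nil =>
    intro z s b h
    have hlen : A.length = s + 1 := by
      have := congrArg List.length h
      simp [List.length_drop] at this
      omega
    rw [PySem.List.pyRange_one_eq_nil (by omega)]
    simp
  | cons x xs ih =>
    intro z s b h
    have hdrop : A.drop (s + 1) = xs ++ [z] := by
      have h2 := congrArg List.tail h
      simpa [List.tail_drop] using h2
    have hlen : s + 1 + 1 ≤ A.length := by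
      have := congrArg List.length hdrop
      simp [List.length_drop] at this
      omega
    have hget : A[s]? = some x := by
      have : (A.drop s)[0]? = some x := by rw [h]; rfl
      simpa [List.getElem?_drop] using this
    have htake : (A.take (s + 1)).sum = (A.take s).sum + x := by
      rw [List.take_add_one, hget]; simp
    have hsum : (A.drop (s + 1)).sum = A.sum - (A.take (s + 1)).sum := by
      have := List.sum_take_add_sum_drop A (s + 1)
      omega
    have hcast : ((s : Int) + 1) = (((s + 1 : ℕ)) : Int) := by push_cast; ring
    rw [PySem.List.pyRange_one_cons (by omega)]
    simp only [List.foldl_cons]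
    rw [hcast, slice_split_left A (s + 1), slice_split_right A (s + 1)]
    have habs : |(A.take (s + 1)).sum - (A.drop (s + 1)).sum| = |2 * ((A.take s).sum + x) - A.sum| := by
      rw [hsum, htake]; congr 1; ring
    simp only [habs]
    have := ih z (s + 1) (if |2 * ((A.take s).sum + x) - A.sum| < b then |2 * ((A.take s).sum + x) - A.sum| else b) hdrop
    rw [htake] at this
    rw [this]

-- ===== VERDICT (by name: the statement is the Claim_ definition above) =====
theorem solution_spec : Claim_equal_solution := by
  intro A _ hpre
  unfold Spec_solution solution solution_alt
  obtain ⟨a, rest, rfl⟩ : ∃ a rest, A = a :: rest := by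
    cases A with
    | nil => exact absurd rfl hpre
    | cons a rest => exact ⟨a, rest, rfl⟩
  have hget : PySem.List.pyGetD (a :: rest) 0 0 = a := PySem.List.pyGetD_zero_cons a rest 0
  have hN : ((a :: rest).length : Int) = ((rest.length + 1 : ℕ) : Int) := by simp
  have hslice1 : PySem.List.slice (a :: rest) (some 1) (some ((a :: rest).length : Int)) = rest := by
    have h1 : (1 : Int) = ((1 : ℕ) : Int) := by norm_num
    rw [hN, h1, PySem.List.slice_natCast]
    simp
  have hinit : |a - rest.sum| = |2 * a - (a :: rest).sum| := by
    simp only [List.sum_cons]; congr 1; ring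
  rcases List.eq_nil_or_concat rest with hrest | ⟨ys, z, hrest⟩
  · subst hrest
    simp only [hget, hslice1, slice_one_neg_one]
    rw [PySem.List.pyRange_one_eq_nil (by simp)]
    simp [show (2 : Int) * a - a = a from by ring]
  · -- rest = ys ++ [z], so the loops are nonempty
    subst hrest
    simp only [List.concat_eq_append] at hget hslice1 hinit ⊢
    rw [hget, hslice1, slice_one_neg_one, List.dropLast_concat]
    have hloop := loop_eq (a :: (ys ++ [z])) ys z 1 |2 * a - (a :: (ys ++ [z])).sum| (by simp)
    have hacc : (List.take 1 (a :: (ys ++ [z]))).sum = a := by simp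
    rw [hacc] at hloop
    rw [hloop]
    -- now unfold the first iteration (split = 1) of A's loop
    have hNlt : (1 : Int) < (((a :: (ys ++ [z])).length : ℕ) : Int) := by simp
    rw [PySem.List.pyRange_one_cons hNlt]
    simp only [List.foldl_cons]
    have h01 : PySem.List.slice (a :: (ys ++ [z])) (some 0) (some 1) = [a] := by
      have h1 : (1 : Int) = ((1 : ℕ) : Int) := by norm_num
      rw [h1, slice_split_left]
      simp
    rw [h01, hslice1]
    have hs : ([a] : List Int).sum = a := by simp
    rw [hs, if_neg (lt_irrefl _), hinit]
    norm_num
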